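-- pv_equiv track=rewrite | github.com/UW-ERSL/AppliedQC | solutions/PauliML.py | _max_run
-- ===== SOURCE A (Python) =====
-- def _max_run(s: str, char: str) -> int:
--     """Maximum consecutive run of character"""
--     max_run = 0
--     current_run = 0
--     for c in s:
--         if c == char:
--             current_run += 1
--             max_run = max(max_run, current_run)
--         else:
--             current_run = 0
--     return max_run
-- ===== SOURCE B (Python) =====
-- def _max_run(s: str, char: str) -> int:
--     """Maximum consecutive run of character"""
--     return max((n for c, n in _runs(s) if c == char), default=0)
--
-- def _runs(s):
--     """Run-length encode s into (char, run_length) pairs."""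
--     runs = []
--     i = 0
--     n = len(s)
--     while i < n:
--         j = i + 1
--         while j < n and s[j] == s[i]:
--             j += 1
--         runs.append((s[i], j - i))
--         i = j
--     return runs
-- ===== Notes on version B (the rewrite author's own statement) =====
-- stated objective: alternative
-- what changed: B run-length-encodes the string into maximal (char, length) runs first, then takes the max length among runs of the target character, instead of threading a running counter and a running maximum through a single accumulator loop.
import Mathlib
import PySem

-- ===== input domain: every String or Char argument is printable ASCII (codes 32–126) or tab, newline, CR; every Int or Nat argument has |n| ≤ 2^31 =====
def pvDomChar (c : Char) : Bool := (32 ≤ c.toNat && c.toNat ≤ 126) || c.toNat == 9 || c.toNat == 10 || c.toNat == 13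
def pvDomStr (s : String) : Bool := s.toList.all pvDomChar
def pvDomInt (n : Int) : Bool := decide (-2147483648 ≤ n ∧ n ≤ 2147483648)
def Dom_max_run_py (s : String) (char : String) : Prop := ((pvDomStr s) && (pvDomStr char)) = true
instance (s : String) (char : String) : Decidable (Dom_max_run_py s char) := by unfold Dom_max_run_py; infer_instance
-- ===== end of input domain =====

-- B re-implements the counter loop as run-length encoding + filter/max; same O(n) cost, proved equal on all inputs.

-- ===== PORT A =====
-- single pass with a running counter and running maximum, exactly A's loop
def max_run_py (s : String) (char : String) : Int :=
  (s.toList.foldl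
    (fun (st : Int × Int) c =>
      if String.ofList [c] = char then
        (max st.1 (st.2 + 1), st.2 + 1)
      else (st.1, 0))
    (0, 0)).1

-- ===== PORT B =====
-- _runs: run-length encoding; the inner while loop counts the equal prefix (takeWhile), s[i:] is the remainder
def pvRuns : List Char → List (Char × Int)
  | [] => []
  | c :: rest =>
      (c, ((rest.takeWhile (fun x => x == c)).length : Int) + 1)
        :: pvRuns (rest.dropWhile (fun x => x == c))
termination_by l => l.length
decreasing_by
  have := List.length_dropWhile_le (p := fun x => x == c) (l := rest)
  simp; omega

-- max(... , default=0) over the runs whose character equals char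
def max_run_py_alt (s : String) (char : String) : Int :=
  (pvRuns s.toList).foldl
    (fun acc p => if String.ofList [p.1] = char then max acc p.2 else acc) 0

-- ===== PRECONDITION & SPEC =====
def Spec_max_run_py (s : String) (char : String) (out : Int) : Prop := out = max_run_py_alt s char
instance (s : String) (char : String) (out : Int) : Decidable (Spec_max_run_py s char out) := by unfold Spec_max_run_py; infer_instance

-- ===== CLAIM (what is proved, stated in full; the proofs are below) =====
def Claim_equal_max_run_py : Prop := ∀ (s : String) (char : String), Dom_max_run_py s char → Spec_max_run_py s char (max_run_py s char)

-- ===== LEMMAS AND PROOFS =====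
def stepA (char : String) (st : Int × Int) (c : Char) : Int × Int :=
  if String.ofList [c] = char then (max st.1 (st.2 + 1), st.2 + 1) else (st.1, 0)

def stepB (char : String) (acc : Int) (p : Char × Int) : Int :=
  if String.ofList [p.1] = char then max acc p.2 else acc

lemma max_run_py_eq (s char : String) :
    max_run_py s char = (s.toList.foldl (stepA char) (0, 0)).1 := rfl

lemma max_run_py_alt_eq (s char : String) :
    max_run_py_alt s char = (pvRuns s.toList).foldl (stepB char) 0 := rfl

-- processing a block of k copies of c when c matches char
lemma blockA_pos (char : String) (c : Char) (hp : String.ofList [c] = char) :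
    ∀ (k : Nat) (M cur : Int), cur ≤ M →
      List.foldl (stepA char) (M, cur) (List.replicate k c) = (max M (cur + k), cur + k) := by
  intro k
  induction k with
  | zero => intro M cur h; simp [max_eq_left h]
  | succ k ih =>
      intro M cur h
      rw [List.replicate_succ, List.foldl_cons]
      have hs : stepA char (M, cur) c = (max M (cur + 1), cur + 1) := by
        simp [stepA, hp]
      rw [hs, ih _ _ (le_max_right _ _)]
      have : max (max M (cur + 1)) (cur + 1 + (k : Int)) = max M (cur + ((k : Nat) + 1 : Nat)) := by
        push_cast; omega
      rw [this]
      push_cast; ring_nf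

-- processing a block of k copies of c when c does not match char
lemma blockA_neg (char : String) (c : Char) (hp : ¬ String.ofList [c] = char) :
    ∀ (k : Nat) (M : Int),
      List.foldl (stepA char) (M, 0) (List.replicate k c) = (M, 0) := by
  intro k
  induction k with
  | zero => intro M; simp
  | succ k ih =>
      intro M
      rw [List.replicate_succ, List.foldl_cons]
      have hs : stepA char (M, (0 : Int)) c = (M, 0) := by simp [stepA, hp]
      rw [hs, ih]

-- the current-run component is irrelevant when the next char does not match
lemma foldA_wipe (char : String) (M cur cur' : Int) (d : Char) (t : List Char)
    (hd : ¬ String.ofList [d] = char) :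
    List.foldl (stepA char) (M, cur) (d :: t) = List.foldl (stepA char) (M, cur') (d :: t) := by
  simp [List.foldl_cons, stepA, hd]

lemma dropWhile_cons_head_false {p : Char → Bool} :
    ∀ (l : List Char) (d : Char) (t : List Char), l.dropWhile p = d :: t → p d = false := by
  intro l
  induction l with
  | nil => intro d t h; simp [List.dropWhile] at h
  | cons a as ih =>
      intro d t h
      by_cases hpa : p a = true
      · rw [List.dropWhile_cons_of_pos hpa] at h; exact ih _ _ h
      · rw [List.dropWhile_cons_of_neg hpa] at h
        injection h with h1 _
        subst h1
        simpa using hpa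

lemma main_lemma (char : String) :
    ∀ (n : Nat) (l : List Char), l.length ≤ n → ∀ (m : Int), 0 ≤ m →
      (List.foldl (stepA char) (m, 0) l).1 = List.foldl (stepB char) m (pvRuns l) := by
  intro n
  induction n with
  | zero =>
      intro l hl m _
      have : l = [] := List.eq_nil_of_length_eq_zero (Nat.le_zero.mp hl)
      subst this; simp [pvRuns]
  | succ n ih =>
      intro l hl m hm
      match l with
      | [] => simp [pvRuns]
      | c :: rest =>
        set q : Char → Bool := fun x => x == c with hq
        set k : Nat := (rest.takeWhile q).length with hk
        have hrep : rest.takeWhile q = List.replicate k c := by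
          rw [List.eq_replicate_iff]
          refine ⟨rfl, ?_⟩
          intro b hb
          have := List.mem_takeWhile_imp hb
          simpa [hq] using this
        have hsplit : rest = List.replicate k c ++ rest.dropWhile q := by
          conv_lhs => rw [← List.takeWhile_append_dropWhile (p := q) (l := rest)]
          rw [hrep]
        have hlen : (rest.dropWhile q).length ≤ n := by
          have h1 := List.length_dropWhile_le q rest
          simp at hl; omega
        rw [pvRuns]
        simp only [List.foldl_cons]
        conv_lhs => rw [hsplit]
        rw [List.foldl_append]
        by_cases hp : String.ofList [c] = char
        · have hs1 : stepA char (m, (0 : Int)) c = (max m 1, 1) := by simp [stepA, hp]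
          rw [hs1, blockA_pos char c hp k _ _ (le_max_right _ _)]
          have hmax : max (max m 1) (1 + (k : Int)) = max m ((k : Int) + 1) := by omega
          have hstepB : stepB char m (c, (k : Int) + 1) = max m ((k : Int) + 1) := by
            simp [stepB, hp]
          rw [hmax, hstepB]
          have hM : (0 : Int) ≤ max m ((k : Int) + 1) := le_trans hm (le_max_left _ _)
          match hrest : rest.dropWhile q with
          | [] => simp [pvRuns]
          | d :: t =>
            have hdc : q d = false := dropWhile_cons_head_false rest d t hrest
            have hdchar : ¬ String.ofList [d] = char := by
              intro hcontra
              have hdc2 : String.ofList [d] = String.ofList [c] := by rw [hcontra, ← hp]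
              have hd : d = c := by
                simpa using congrArg String.toList hdc2
              simp [hq, hd] at hdc
            rw [foldA_wipe char _ (1 + (k : Int)) 0 d t hdchar]
            exact ih (d :: t) (hrest ▸ hlen) _ hM
        · have hs1 : stepA char (m, (0 : Int)) c = (m, 0) := by simp [stepA, hp]
          rw [hs1, blockA_neg char c hp k m]
          have hstepB : stepB char m (c, (k : Int) + 1) = m := by simp [stepB, hp]
          rw [hstepB]
          exact ih _ hlen m hm

-- ===== VERDICT (by name: the statement is the Claim_ definition above) =====
theorem max_run_py_spec : Claim_equal_max_run_py := by
  intro s char _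
  show max_run_py s char = max_run_py_alt s char
  rw [max_run_py_eq, max_run_py_alt_eq]
  exact main_lemma char s.toList.length s.toList le_rfl 0 le_rfl
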